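-- pv_equiv track=rewrite | github.com/jctanner/galaxy-hacking | pulp_ansible_hacking/old-scripts/benchmark_report2.py | group_stats_by_time
-- ===== SOURCE A (Python) =====
-- def group_stats_by_time(stats_rows):
--     tmap = {}
--     for sr in stats_rows:
--         ts = sr['time']
--         if ts not in tmap:
--             tmap[ts] = {}
--         for k,v in sr.items():
--             tmap[ts][k] = v
--     newdata = list(tmap.values())
--     newdata = sorted(newdata, key=lambda x: x['time'])
--     #import epdb; epdb.st()
--     return newdata
-- ===== SOURCE B (Python) =====
-- def group_stats_by_time(stats_rows):
--     # sort the distinct times, then merge each time's rows with one scan per time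
--     times = sorted({sr['time'] for sr in stats_rows})
--     newdata = []
--     for t in times:
--         merged = {}
--         for sr in stats_rows:
--             if sr['time'] == t:
--                 merged.update(sr)
--         newdata.append(merged)
--     return newdata
-- ===== Notes on version B (the rewrite author's own statement) =====
-- stated objective: alternative
-- what changed: Replaces A's incrementally built dict-of-dicts keyed by time (then sorting its values by the merged dicts' 'time' field) with: collect the set of distinct times, sort it, and build each merged row by one scan over the input per distinct time.
import Mathlib
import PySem

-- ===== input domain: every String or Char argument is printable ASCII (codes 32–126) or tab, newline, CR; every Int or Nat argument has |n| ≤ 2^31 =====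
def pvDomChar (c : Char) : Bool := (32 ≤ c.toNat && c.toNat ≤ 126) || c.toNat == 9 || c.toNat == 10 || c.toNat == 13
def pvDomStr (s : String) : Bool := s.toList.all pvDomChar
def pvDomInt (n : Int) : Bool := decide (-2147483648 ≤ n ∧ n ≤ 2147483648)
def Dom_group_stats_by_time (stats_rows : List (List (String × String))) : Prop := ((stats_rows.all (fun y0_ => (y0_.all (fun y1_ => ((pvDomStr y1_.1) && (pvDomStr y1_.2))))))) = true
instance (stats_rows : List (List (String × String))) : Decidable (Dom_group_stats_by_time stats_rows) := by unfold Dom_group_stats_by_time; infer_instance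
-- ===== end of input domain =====

-- B is an alternative algorithm: sort the distinct times, then one merging scan over the input
-- per distinct time (no dict-of-dicts); neither implementation mutates its input.

-- sr['time'] on the association list of a Python dict: first match (totalised with "";
-- Pre_ keeps only inputs where the key exists); both Pythons evaluate sr['time'].
def pvTime (sr : List (String × String)) : String := (sr.lookup "time").getD ""

-- d.update(sr) / 'for k,v in sr.items(): d[k] = v' — the dict-update loop both Pythons run.
def pvUpd (d : PySem.Dict String String) (sr : List (String × String)) : PySem.Dict String String :=
  sr.foldl (fun d kv => d.insert kv.1 kv.2) d

-- ===== PORT A =====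
def group_stats_by_time (stats_rows : List (List (String × String))) : List (List (String × String)) :=
  let tmap : PySem.Dict String (PySem.Dict String String) :=
    stats_rows.foldl (fun tmap sr =>
      let ts := pvTime sr
      let tmap1 := if tmap.contains ts then tmap else tmap.insert ts PySem.Dict.empty
      tmap1.insert ts (pvUpd (tmap1.getD ts PySem.Dict.empty) sr)) PySem.Dict.empty
  let newdata := tmap.values
  (PySem.List.sorted newdata (fun (x : PySem.Dict String String) => x.getD "time" "") false).map PySem.Dict.items

-- ===== PORT B =====
def group_stats_by_time_alt (stats_rows : List (List (String × String))) : List (List (String × String)) :=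
  let times := PySem.List.sorted (PySem.Set.ofList (stats_rows.map pvTime)) (fun x => x) false
  times.map (fun t =>
    (stats_rows.foldl (fun merged sr => if pvTime sr == t then pvUpd merged sr else merged)
      PySem.Dict.empty).items)

-- ===== PRECONDITION & SPEC =====
-- Pre_ excludes rows without a 'time' key (Python A raises KeyError there) and association
-- lists with a duplicated key inside a row, which no Python dict can produce (they lie outside
-- the image of the dict → association-list type convention).
def Pre_group_stats_by_time (stats_rows : List (List (String × String))) : Prop :=
  ∀ sr ∈ stats_rows, (sr.map Prod.fst).Nodup ∧ "time" ∈ sr.map Prod.fst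
instance (stats_rows : List (List (String × String))) : Decidable (Pre_group_stats_by_time stats_rows) := by unfold Pre_group_stats_by_time; infer_instance

def pvWitness_group_stats_by_time : (List (List (String × String))) :=
  [[("time", "1"), ("a", "x")], [("time", "1"), ("b", "y")], [("time", "0")]]

def Spec_group_stats_by_time (stats_rows : List (List (String × String))) (out : List (List (String × String))) : Prop := out = group_stats_by_time_alt stats_rows
instance (stats_rows : List (List (String × String))) (out : List (List (String × String))) : Decidable (Spec_group_stats_by_time stats_rows out) := by unfold Spec_group_stats_by_time; infer_instance

-- ===== CLAIM (what is proved, stated in full; the proofs are below) =====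
def Claim_equal_group_stats_by_time : Prop := ∀ (stats_rows : List (List (String × String))), Dom_group_stats_by_time stats_rows → Pre_group_stats_by_time stats_rows → Spec_group_stats_by_time stats_rows (group_stats_by_time stats_rows)

-- ===== LEMMAS AND PROOFS =====

def pvMerge (stats_rows : List (List (String × String))) (t : String)
    (d0 : PySem.Dict String String) : PySem.Dict String String :=
  (stats_rows.filter (fun sr => pvTime sr == t)).foldl pvUpd d0

theorem tmap_items (rows : List (List (String × String)))
    (d : PySem.Dict String (PySem.Dict String String)) (hnd : d.keys.Nodup) :
    (rows.foldl (fun tmap sr =>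
      let ts := pvTime sr
      let tmap1 := if tmap.contains ts then tmap else tmap.insert ts PySem.Dict.empty
      tmap1.insert ts (pvUpd (tmap1.getD ts PySem.Dict.empty) sr)) d).items
    = (PySem.Set.update d.keys (rows.map pvTime)).map
        (fun t => (t, pvMerge rows t (d.getD t PySem.Dict.empty))) := by
  induction rows generalizing d with
  | nil =>
    simp [pvMerge, PySem.Set.update, PySem.Dict.items_eq_map_keys d hnd PySem.Dict.empty]
  | cons sr rest ih =>
    have hstep : ∀ t, ((if d.contains (pvTime sr) then d else d.insert (pvTime sr) PySem.Dict.empty).insert (pvTime sr)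
        (pvUpd ((if d.contains (pvTime sr) then d else d.insert (pvTime sr) PySem.Dict.empty).getD (pvTime sr) PySem.Dict.empty) sr)).getD t PySem.Dict.empty
        = if t = pvTime sr then pvUpd (d.getD (pvTime sr) PySem.Dict.empty) sr else d.getD t PySem.Dict.empty := by
      intro t
      by_cases hc : d.contains (pvTime sr)
      · simp [hc, PySem.Dict.getD_insert]
      · have h0 : d.getD (pvTime sr) PySem.Dict.empty = PySem.Dict.empty :=
          PySem.Dict.getD_of_not_contains d _ (by simpa using hc)
        by_cases ht : t = pvTime sr <;> simp [hc, PySem.Dict.getD_insert, h0, ht]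
    have hkeys : ((if d.contains (pvTime sr) then d else d.insert (pvTime sr) PySem.Dict.empty).insert (pvTime sr)
        (pvUpd ((if d.contains (pvTime sr) then d else d.insert (pvTime sr) PySem.Dict.empty).getD (pvTime sr) PySem.Dict.empty) sr)).keys
        = PySem.Set.add d.keys (pvTime sr) := by
      by_cases hc : d.contains (pvTime sr)
      · rw [if_pos hc, PySem.Dict.keys_insert_of_contains d _ hc, PySem.Set.add]
        rw [if_pos]
        simpa [List.contains_iff_mem] using (PySem.Dict.contains_iff_mem_keys d _).mp hc
      · rw [if_neg hc, PySem.Dict.keys_insert_of_contains _ _ (PySem.Dict.contains_insert_self _ _ _),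
            PySem.Dict.keys_insert_of_not_contains d _ (by simpa using hc), PySem.Set.add]
        rw [if_neg]
        intro hmem
        exact absurd ((PySem.Dict.contains_iff_mem_keys d _).mpr (by simpa [List.contains_iff_mem] using hmem)) (by simpa using hc)
    have hnd2 : ((if d.contains (pvTime sr) then d else d.insert (pvTime sr) PySem.Dict.empty).insert (pvTime sr)
        (pvUpd ((if d.contains (pvTime sr) then d else d.insert (pvTime sr) PySem.Dict.empty).getD (pvTime sr) PySem.Dict.empty) sr)).keys.Nodup := by
      by_cases hc : d.contains (pvTime sr)
      · rw [if_pos hc]; exact PySem.Dict.nodup_keys_insert _ _ _ hnd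
      · rw [if_neg hc]
        exact PySem.Dict.nodup_keys_insert _ _ _ (PySem.Dict.nodup_keys_insert _ _ _ hnd)
    simp only [List.foldl_cons]
    rw [ih _ hnd2, hkeys]
    have hupd : PySem.Set.update d.keys (List.map pvTime (sr :: rest))
        = PySem.Set.update (PySem.Set.add d.keys (pvTime sr)) (List.map pvTime rest) := by
      simp [PySem.Set.update]
    rw [hupd]
    congr 1
    funext t
    rw [hstep t]
    simp only [pvMerge, List.filter_cons]
    by_cases ht : t = pvTime sr
    · simp [ht]
    · have ht2 : ¬ (pvTime sr = t) := fun h => ht h.symm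
      simp [ht, ht2]

theorem lookup_cons_ne (k : String) (kv : String × String) (rest : List (String × String))
    (h : ¬ k = kv.1) : List.lookup k (kv :: rest) = List.lookup k rest := by
  obtain ⟨a, b⟩ := kv
  simp only [List.lookup_cons]
  rw [show (k == a) = false from by simpa using h]

theorem lookup_cons_eq (k : String) (kv : String × String) (rest : List (String × String))
    (h : kv.1 = k) : List.lookup k (kv :: rest) = some kv.2 := by
  obtain ⟨a, b⟩ := kv
  simp only [List.lookup_cons]
  rw [show (k == a) = true from by simp at h; simp [h]]

theorem upd_getD_notmem (sr : List (String × String)) (d : PySem.Dict String String)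
    (k : String) (v0 : String) (h : k ∉ sr.map Prod.fst) :
    (pvUpd d sr).getD k v0 = d.getD k v0 := by
  induction sr generalizing d with
  | nil => rfl
  | cons kv rest ih =>
    simp only [List.map_cons, List.mem_cons, not_or] at h
    simp only [pvUpd, List.foldl_cons]
    rw [show (List.foldl (fun d kv => d.insert kv.1 kv.2) (d.insert kv.1 kv.2) rest)
        = pvUpd (d.insert kv.1 kv.2) rest from rfl, ih _ h.2,
      PySem.Dict.getD_insert]
    rw [if_neg h.1]

theorem upd_getD (sr : List (String × String)) (d : PySem.Dict String String)
    (k v v0 : String) (hnd : (sr.map Prod.fst).Nodup) (hv : sr.lookup k = some v) :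
    (pvUpd d sr).getD k v0 = v := by
  induction sr generalizing d with
  | nil => simp at hv
  | cons kv rest ih =>
    simp only [List.map_cons, List.nodup_cons] at hnd
    simp only [pvUpd, List.foldl_cons]
    by_cases hk : k = kv.1
    · have hv2 : v = kv.2 := by
        rw [lookup_cons_eq k kv rest hk.symm] at hv
        exact (Option.some_injective _ hv).symm
      have hnm : k ∉ rest.map Prod.fst := by rw [hk]; exact hnd.1
      rw [show (List.foldl (fun d kv => d.insert kv.1 kv.2) (d.insert kv.1 kv.2) rest)
          = pvUpd (d.insert kv.1 kv.2) rest from rfl, upd_getD_notmem _ _ _ _ hnm,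
        PySem.Dict.getD_insert, if_pos hk, hv2]
    · have hv2 : rest.lookup k = some v := by
        rwa [lookup_cons_ne k kv rest hk] at hv
      exact ih (d.insert kv.1 kv.2) hnd.2 hv2

theorem merge_getD (t : String) (l : List (List (String × String))) :
    ∀ d0, l ≠ [] → (∀ sr ∈ l, (sr.map Prod.fst).Nodup ∧ sr.lookup "time" = some t) →
    (l.foldl pvUpd d0).getD "time" "" = t := by
  induction l with
  | nil => intro d0 h; exact absurd rfl h
  | cons sr rest ih =>
    intro d0 _ hall
    rcases rest with _ | ⟨sr2, rest2⟩
    · simpa using upd_getD sr d0 "time" t "" (hall sr (by simp)).1 (hall sr (by simp)).2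
    · rw [List.foldl_cons]
      exact ih _ (by simp) (fun x hx => hall x (List.mem_cons_of_mem _ hx))

theorem pre_lookup (sr : List (String × String)) (h : "time" ∈ sr.map Prod.fst) :
    sr.lookup "time" = some (pvTime sr) := by
  induction sr with
  | nil => simp at h
  | cons kv rest ih =>
    by_cases hk : kv.1 = "time"
    · rw [pvTime, lookup_cons_eq _ kv rest hk]
      rfl
    · have h2 : "time" ∈ rest.map Prod.fst := by
        simp only [List.map_cons, List.mem_cons] at h
        rcases h with h | h
        · exact absurd h.symm hk
        · exact h
      rw [pvTime, lookup_cons_ne _ kv rest (fun e => hk e.symm), ih h2]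
      rfl

theorem merge_time (rows : List (List (String × String)))
    (hpre : Pre_group_stats_by_time rows) (t : String)
    (ht : t ∈ PySem.Set.ofList (rows.map pvTime)) :
    (pvMerge rows t PySem.Dict.empty).getD "time" "" = t := by
  rw [PySem.Set.mem_ofList] at ht
  obtain ⟨sr0, hsr0, hts⟩ := List.mem_map.mp ht
  have hmem : sr0 ∈ rows.filter (fun sr => pvTime sr == t) :=
    List.mem_filter.mpr ⟨hsr0, by simp [hts]⟩
  refine merge_getD t _ _ (List.ne_nil_of_mem hmem) ?_
  intro x hx
  have hxr := (List.mem_filter.mp hx).1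
  have hxt : pvTime x = t := by simpa using (List.mem_filter.mp hx).2
  obtain ⟨h1, h2⟩ := hpre x hxr
  exact ⟨h1, by rw [pre_lookup x h2, hxt]⟩

theorem ports_agree (stats_rows : List (List (String × String)))
    (hpre : Pre_group_stats_by_time stats_rows) :
    group_stats_by_time stats_rows = group_stats_by_time_alt stats_rows := by
  rw [group_stats_by_time, group_stats_by_time_alt]
  have hitems := tmap_items stats_rows PySem.Dict.empty (by simp [PySem.Dict.keys_empty])
  have hvals : (stats_rows.foldl (fun tmap sr =>
      let ts := pvTime sr
      let tmap1 := if tmap.contains ts then tmap else tmap.insert ts PySem.Dict.empty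
      tmap1.insert ts (pvUpd (tmap1.getD ts PySem.Dict.empty) sr)) PySem.Dict.empty).values
      = (PySem.Set.ofList (stats_rows.map pvTime)).map (fun t => pvMerge stats_rows t PySem.Dict.empty) := by
    rw [PySem.Dict.values, hitems]
    simp [List.map_map, PySem.Set.update, PySem.Set.ofList_eq_foldl, PySem.Dict.keys_empty,
      PySem.Dict.getD_empty, Function.comp_def]
  rw [hvals]
  have hB : ∀ t, (stats_rows.foldl (fun merged sr => if pvTime sr == t then pvUpd merged sr else merged)
      PySem.Dict.empty) = pvMerge stats_rows t PySem.Dict.empty := by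
    intro t
    rw [pvMerge, List.foldl_filter]
  have hsorted : PySem.List.sorted ((PySem.Set.ofList (stats_rows.map pvTime)).map
        (fun t => pvMerge stats_rows t PySem.Dict.empty))
        (fun (x : PySem.Dict String String) => x.getD "time" "") false
      = (PySem.List.sorted (PySem.Set.ofList (stats_rows.map pvTime)) (fun x => x) false).map
        (fun t => pvMerge stats_rows t PySem.Dict.empty) := by
    apply PySem.List.sorted_eq_of_perm_of_pairwise_lt
    · exact (PySem.List.sorted_perm _ _ _).map _
    · have hp := PySem.List.sorted_ofList_pairwise_lt (stats_rows.map pvTime)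
      rw [List.pairwise_map]
      refine hp.imp_of_mem ?_
      intro a b ha hb hlt
      have ha' : a ∈ PySem.Set.ofList (stats_rows.map pvTime) :=
        (PySem.List.mem_sorted _ _ _ _).mp ha
      have hb' : b ∈ PySem.Set.ofList (stats_rows.map pvTime) :=
        (PySem.List.mem_sorted _ _ _ _).mp hb
      rw [merge_time stats_rows hpre a ha', merge_time stats_rows hpre b hb']
      exact hlt
  simp only [hB, hsorted, List.map_map, Function.comp_def]


-- ===== VERDICT (by name: the statement is the Claim_ definition above) =====
theorem group_stats_by_time_spec : Claim_equal_group_stats_by_time := by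
  intro stats_rows _ hpre
  exact ports_agree stats_rows hpre
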